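-- pv_equiv track=rewrite | github.com/Lilly-Rowland/HMM_Gene_Prediction | eval_utils.py | detect_regions
-- ===== SOURCE A (Python) =====
-- def is_coding_state(state):
--     return state in {"C", "START", "EXON", "STOP", "C1", "C2", "C3"}
--
-- def detect_regions(labels):
--     regions = []
--     in_region = False
--     start = 0
--
--     for i, lab in enumerate(labels):
--         if is_coding_state(lab) and not in_region:
--             # start new coding region
--             start = i
--             in_region = True
--         elif not is_coding_state(lab) and in_region:
--             regions.append((start, i - 1))
--             in_region = False
--
--     if in_region:
--         regions.append((start, len(labels) - 1))
--
--     return regions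
-- ===== SOURCE B (Python) =====
-- def is_coding_state(state):
--     return state in {"C", "START", "EXON", "STOP", "C1", "C2", "C3"}
--
-- def detect_regions(labels):
--     # run-scanning: find each maximal run of same-kind states, emit coding runs
--     regions = []
--     i, n = 0, len(labels)
--     while i < n:
--         k = is_coding_state(labels[i])
--         j = i + 1
--         while j < n and is_coding_state(labels[j]) == k:
--             j += 1
--         if k:
--             regions.append((i, j - 1))
--         i = j
--     return regions
-- ===== Notes on version B (the rewrite author's own statement) =====
-- stated objective: alternative
-- what changed: Replaces A's in_region flag state machine (with trailing-region flush) by a run-scanning loop that finds each maximal run of same-kind states and emits coding runs directly.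
import Mathlib
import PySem

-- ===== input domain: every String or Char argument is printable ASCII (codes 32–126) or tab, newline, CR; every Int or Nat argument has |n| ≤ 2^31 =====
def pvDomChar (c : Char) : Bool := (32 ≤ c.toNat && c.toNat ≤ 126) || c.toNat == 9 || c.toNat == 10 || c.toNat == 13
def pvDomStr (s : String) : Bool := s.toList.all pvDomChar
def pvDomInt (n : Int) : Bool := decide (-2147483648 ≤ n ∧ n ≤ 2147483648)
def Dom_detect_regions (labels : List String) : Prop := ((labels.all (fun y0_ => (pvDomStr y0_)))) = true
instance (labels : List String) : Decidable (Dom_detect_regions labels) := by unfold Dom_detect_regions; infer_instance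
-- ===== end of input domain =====

-- B replaces A's in_region flag state machine by a run-scanning loop over maximal
-- same-kind runs (alternative decomposition, same O(n) cost); proved equal on all inputs.


-- ===== PORT A =====
def is_coding_state (state : String) : Bool :=
  state == "C" || state == "START" || state == "EXON" || state == "STOP" ||
  state == "C1" || state == "C2" || state == "C3"

-- the for loop over enumerate(labels): i is the current index; at the end of the
-- list i equals len(labels), so the trailing flush (start, len(labels)-1) is (start, i-1)
def aLoop (labels : List String) (i : Int) (in_region : Bool) (start : Int)
    (regions : List (Int × Int)) : List (Int × Int) :=
  match labels with
  | [] => if in_region then regions ++ [(start, i - 1)] else regions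
  | lab :: rest =>
    if is_coding_state lab && !in_region then
      aLoop rest (i + 1) true i regions
    else if !(is_coding_state lab) && in_region then
      aLoop rest (i + 1) false start (regions ++ [(start, i - 1)])
    else
      aLoop rest (i + 1) in_region start regions

def detect_regions (labels : List String) : List (Int × Int) :=
  aLoop labels 0 false 0 []

-- ===== PORT B =====
def is_coding_state_alt (state : String) : Bool :=
  state == "C" || state == "START" || state == "EXON" || state == "STOP" ||
  state == "C1" || state == "C2" || state == "C3"

-- inner while loop: length of the maximal prefix whose coding-kind equals k, and the rest
def bRun (k : Bool) : List String → Nat × List String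
  | [] => (0, [])
  | x :: xs =>
    if is_coding_state_alt x == k then ((bRun k xs).1 + 1, (bRun k xs).2)
    else (0, x :: xs)

theorem bRun_snd_length_le (k : Bool) (l : List String) : (bRun k l).2.length ≤ l.length := by
  induction l with
  | nil => simp [bRun]
  | cons x xs ih =>
    simp only [bRun]
    split
    · exact le_trans ih (Nat.le_succ _)
    · simp

-- outer while loop: process one maximal run per step
def bLoop : List String → Int → List (Int × Int)
  | [], _ => []
  | x :: xs, i =>
    let k := is_coding_state_alt x
    let c : Nat := (bRun k xs).1 + 1
    let r := (bRun k xs).2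
    (if k then [(i, i + (c : Int) - 1)] else []) ++ bLoop r (i + (c : Int))
  termination_by l => l.length
  decreasing_by
    exact Nat.lt_succ_of_le (bRun_snd_length_le _ _)

def detect_regions_alt (labels : List String) : List (Int × Int) :=
  bLoop labels 0

-- ===== PRECONDITION & SPEC =====
def Spec_detect_regions (labels : List String) (out : List (Int × Int)) : Prop := out = detect_regions_alt labels
instance (labels : List String) (out : List (Int × Int)) : Decidable (Spec_detect_regions labels out) := by unfold Spec_detect_regions; infer_instance

-- ===== CLAIM (what is proved, stated in full; the proofs are below) =====
def Claim_equal_detect_regions : Prop := ∀ (labels : List String), Dom_detect_regions labels → Spec_detect_regions labels (detect_regions labels)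

-- ===== LEMMAS AND PROOFS =====

-- the regions accumulator is only appended to
theorem aLoop_acc (labels : List String) :
    ∀ (i : Int) (inr : Bool) (start : Int) (regions : List (Int × Int)),
    aLoop labels i inr start regions = regions ++ aLoop labels i inr start [] := by
  induction labels with
  | nil =>
    intro i inr start regions
    cases inr <;> simp [aLoop]
  | cons lab rest ih =>
    intro i inr start regions
    simp only [aLoop]
    split
    · exact ih _ _ _ _
    · split
      · simp only [List.nil_append]
        rw [ih _ _ _ (regions ++ [(start, i - 1)]), ih _ _ _ ([(start, i - 1)])]
        simp
      · exact ih _ _ _ _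

-- one bLoop step over a non-coding head run
theorem bLoop_cons_false (x : String) (xs : List String) (i : Int)
    (h : is_coding_state_alt x = false) : bLoop (x :: xs) i = bLoop xs (i + 1) := by
  have hskip : bLoop xs (i + 1) =
      bLoop (bRun false xs).2 (i + 1 + ((bRun false xs).1 : Int)) := by
    cases xs with
    | nil => simp [bRun]
    | cons y ys =>
      by_cases hy : is_coding_state_alt y
      · simp [bRun, hy]
      · simp only [Bool.not_eq_true] at hy
        conv_lhs => rw [bLoop]
        simp only [hy, bRun, if_pos, beq_self_eq_true, Bool.false_eq_true, if_false,
          List.nil_append]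
  conv_lhs => rw [bLoop]
  simp only [h, Bool.false_eq_true, if_false, List.nil_append]
  rw [hskip]
  congr 1
  push_cast
  ring

-- one bLoop step over a coding head
theorem bLoop_cons_true (x : String) (xs : List String) (i : Int)
    (h : is_coding_state_alt x = true) :
    bLoop (x :: xs) i =
      (i, i + ((bRun true xs).1 : Int) + 1 - 1) ::
        bLoop (bRun true xs).2 (i + ((bRun true xs).1 : Int) + 1) := by
  conv_lhs => rw [bLoop]
  simp only [h, if_true, List.singleton_append]
  push_cast
  ring_nf

-- main invariant: the flag machine from state (inr, start) equals the run scanner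
theorem main_inv (l : List String) :
    (∀ (i start : Int), aLoop l i false start [] = bLoop l i) ∧
    (∀ (i start : Int), aLoop l i true start [] =
      (start, i + ((bRun true l).1 : Int) - 1) :: bLoop (bRun true l).2 (i + ((bRun true l).1 : Int))) := by
  induction l with
  | nil =>
    constructor
    · intro i start; simp [aLoop, bLoop]
    · intro i start; simp [aLoop, bLoop, bRun]
  | cons x xs ih =>
    obtain ⟨ihF, ihT⟩ := ih
    have hcode : is_coding_state x = is_coding_state_alt x := rfl
    constructor
    · intro i start
      by_cases h : is_coding_state_alt x
      · -- head coding: enter region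
        simp only [aLoop, hcode, h, Bool.not_false, Bool.and_true, if_true]
        rw [ihT (i + 1) i, bLoop_cons_true x xs i h]
        ring_nf
      · -- head non-coding, not in region: skip
        simp only [Bool.not_eq_true] at h
        simp only [aLoop, hcode, h, Bool.and_false, Bool.false_and, Bool.false_eq_true,
          if_false]
        rw [ihF (i + 1) start, bLoop_cons_false x xs i h]
    · intro i start
      by_cases h : is_coding_state_alt x
      · -- head coding, in region: stay
        simp only [aLoop, hcode, h, Bool.not_true, Bool.and_false, Bool.false_and,
          Bool.false_eq_true, if_false]
        rw [ihT (i + 1) start]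
        rw [show bRun true (x :: xs) = ((bRun true xs).1 + 1, (bRun true xs).2) from by
          simp [bRun, h]]
        push_cast
        ring_nf
      · -- head non-coding, in region: emit (start, i-1), leave region
        simp only [Bool.not_eq_true] at h
        simp only [aLoop, hcode, h, Bool.false_and, Bool.false_eq_true,
          if_false, Bool.not_false, Bool.true_and, if_true, List.nil_append]
        rw [aLoop_acc, ihF (i + 1) start]
        rw [show bRun true (x :: xs) = (0, x :: xs) from by simp [bRun, h]]
        simp only [Nat.cast_zero, add_zero]
        rw [bLoop_cons_false x xs i h]
        rfl

-- ===== VERDICT (by name: the statement is the Claim_ definition above) =====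
theorem detect_regions_spec : Claim_equal_detect_regions := by
  intro labels _
  unfold Spec_detect_regions detect_regions detect_regions_alt
  exact (main_inv labels).1 0 0
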